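-- pv_equiv track=rewrite | github.com/Supcode123/Skin-Segmentation-4-iPPG | code_projects/data/experiments.py | remap_label
-- ===== SOURCE A (Python) =====
-- EXP1 = {"LABEL": {
--     0: [1],
--     1: [2],
--     2: [3],
--     3: [4],
--     4: [5],
--     5: [6],
--     6: [7],
--     7: [8],
--     8: [9],
--     9: [10],
--     10: [11],
--     11: [12],
--     12: [13],
--     13: [14],
--     14: [15],
--     15: [16],
--     16: [17],
--     17: [18],
--     255: [0,255],
-- },
--     "CLASS": {
--         # 0: 'Background',
--         0: 'Skin',
--         1: 'Nose',
--         2: 'Right_Eye',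
--         3: 'Left_Eye',
--         4: 'Right_Brow',
--         5: 'Left_Brow',
--         6: 'Right_Ear',
--         7: 'Left_Ear',
--         8: 'Mouth_Interior',
--         9: 'Top_Lip',
--         10: 'Bottom_Lip',
--         11: 'Neck',
--         12: 'Hair',
--         13: 'Beard',
--         14: 'Clothing',
--         15: 'Glasses',
--         16: 'Headwear',
--         17: 'FACEWEAR',
--         255: "Ignore",
--     }
-- }
--
-- EXP2 = {"LABEL": {
--     0: [3, 4, 5, 6, 7, 8, 9, 10, 11, 12, 13, 14, 15, 16, 17, 18],
--     1: [1, 2],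
--     255: [0,255],
-- },
--     "CLASS": {
--         0: "Non-Skin",
--         1: "Skin",
--         255: "Ignore",
--     }
-- }
--
-- def remap_label(label: int, classes: int):  # -> (int, str):
--
--     """ Returns remapped label id and label name given label and exp id."""
--     if classes == 18 :
--         _exp = EXP1
--     elif classes == 2 :
--         _exp = EXP2
--
--     for k, v in _exp["LABEL"].items():
--
--         if label in v:
--             return k, _exp["CLASS"][k]
--
--     raise ValueError("Could not remap label.")
-- ===== SOURCE B (Python) =====
-- EXP1 = {"LABEL": {
--     0: [1], 1: [2], 2: [3], 3: [4], 4: [5], 5: [6], 6: [7], 7: [8], 8: [9],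
--     9: [10], 10: [11], 11: [12], 12: [13], 13: [14], 14: [15], 15: [16],
--     16: [17], 17: [18], 255: [0, 255],
-- },
--     "CLASS": {
--         0: 'Skin', 1: 'Nose', 2: 'Right_Eye', 3: 'Left_Eye', 4: 'Right_Brow',
--         5: 'Left_Brow', 6: 'Right_Ear', 7: 'Left_Ear', 8: 'Mouth_Interior',
--         9: 'Top_Lip', 10: 'Bottom_Lip', 11: 'Neck', 12: 'Hair', 13: 'Beard',
--         14: 'Clothing', 15: 'Glasses', 16: 'Headwear', 17: 'FACEWEAR',
--         255: "Ignore",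
--     }
-- }
--
-- EXP2 = {"LABEL": {
--     0: [3, 4, 5, 6, 7, 8, 9, 10, 11, 12, 13, 14, 15, 16, 17, 18],
--     1: [1, 2],
--     255: [0, 255],
-- },
--     "CLASS": {
--         0: "Non-Skin", 1: "Skin", 255: "Ignore",
--     }
-- }
--
--
-- def remap_label(label: int, classes: int):  # -> (int, str):
--     """ Returns remapped label id and label name given label and exp id."""
--     # closed-form arithmetic remap instead of scanning the LABEL table
--     if classes == 18:
--         if 1 <= label <= 18:
--             k = label - 1
--         elif label == 0 or label == 255:
--             k = 255
--         else:
--             raise ValueError("Could not remap label.")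
--         _exp = EXP1
--     elif classes == 2:
--         if 3 <= label <= 18:
--             k = 0
--         elif label == 1 or label == 2:
--             k = 1
--         elif label == 0 or label == 255:
--             k = 255
--         else:
--             raise ValueError("Could not remap label.")
--         _exp = EXP2
--     return k, _exp["CLASS"][k]
-- ===== Notes on version B (the rewrite author's own statement) =====
-- stated objective: simpler
-- what changed: Replaces A's scan over the LABEL dict's value-lists with a closed-form arithmetic remap (k = label-1 for EXP1's 1..18, fixed cases for EXP2), only the CLASS name lookup remains a dict access.
import Mathlib
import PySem

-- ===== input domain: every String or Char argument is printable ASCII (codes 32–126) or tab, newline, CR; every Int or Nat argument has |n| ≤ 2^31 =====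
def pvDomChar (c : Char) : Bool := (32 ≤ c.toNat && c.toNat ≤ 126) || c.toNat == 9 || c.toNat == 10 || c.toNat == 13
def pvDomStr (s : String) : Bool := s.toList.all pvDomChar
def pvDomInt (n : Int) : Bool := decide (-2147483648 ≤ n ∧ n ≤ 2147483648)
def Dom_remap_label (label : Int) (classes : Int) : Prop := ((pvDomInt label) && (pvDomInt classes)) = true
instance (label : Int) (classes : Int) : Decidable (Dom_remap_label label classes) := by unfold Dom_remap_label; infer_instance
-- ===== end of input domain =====

-- B replaces A's linear scan over the LABEL value-lists with a closed-form
-- arithmetic remap of the label to its class key; only the CLASS name lookup stays a dict access.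


-- ===== PORT A =====
-- module-level constants (shared data of the module, used by both versions)
def exp1Label : List (Int × List Int) :=
  [(0, [1]), (1, [2]), (2, [3]), (3, [4]), (4, [5]), (5, [6]), (6, [7]), (7, [8]),
   (8, [9]), (9, [10]), (10, [11]), (11, [12]), (12, [13]), (13, [14]), (14, [15]),
   (15, [16]), (16, [17]), (17, [18]), (255, [0, 255])]

def exp1Class : PySem.Dict Int String :=
  PySem.Dict.ofList [(0, "Skin"), (1, "Nose"), (2, "Right_Eye"), (3, "Left_Eye"), (4, "Right_Brow"),
   (5, "Left_Brow"), (6, "Right_Ear"), (7, "Left_Ear"), (8, "Mouth_Interior"),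
   (9, "Top_Lip"), (10, "Bottom_Lip"), (11, "Neck"), (12, "Hair"), (13, "Beard"),
   (14, "Clothing"), (15, "Glasses"), (16, "Headwear"), (17, "FACEWEAR"),
   (255, "Ignore")]

def exp2Label : List (Int × List Int) :=
  [(0, [3, 4, 5, 6, 7, 8, 9, 10, 11, 12, 13, 14, 15, 16, 17, 18]),
   (1, [1, 2]),
   (255, [0, 255])]

def exp2Class : PySem.Dict Int String :=
  PySem.Dict.ofList [(0, "Non-Skin"), (1, "Skin"), (255, "Ignore")]

-- the for-loop of A: first key k whose value-list contains label
def remapScan (label : Int) : List (Int × List Int) → Option Int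
  | [] => none
  | (k, v) :: rest => if label ∈ v then some k else remapScan label rest

def remap_label (label : Int) (classes : Int) : Int × String :=
  -- Pre_ restricts classes to {18, 2}: otherwise Python hits UnboundLocalError
  let _exp : List (Int × List Int) × PySem.Dict Int String :=
    if classes = 18 then (exp1Label, exp1Class) else (exp2Label, exp2Class)
  match remapScan label _exp.1 with
  | some k => (k, PySem.Dict.getD _exp.2 k "")
  | none => (0, "")  -- Python raises ValueError here; excluded by Pre_

-- ===== PORT B =====
-- closed-form arithmetic remap of label to class key (Source B's if/elif arithmetic)
def remap_label_alt (label : Int) (classes : Int) : Int × String :=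
  if classes = 18 then
    let k : Int :=
      if 1 ≤ label ∧ label ≤ 18 then label - 1
      else if label = 0 ∨ label = 255 then 255
      else 0  -- Python raises ValueError here; excluded by Pre_
    (k, PySem.Dict.getD exp1Class k "")
  else
    let k : Int :=
      if 3 ≤ label ∧ label ≤ 18 then 0
      else if label = 1 ∨ label = 2 then 1
      else if label = 0 ∨ label = 255 then 255
      else 0  -- Python raises ValueError here; excluded by Pre_
    (k, PySem.Dict.getD exp2Class k "")

-- ===== PRECONDITION & SPEC =====
-- Pre_ excludes classes ∉ {18, 2} (Python A raises UnboundLocalError) and labels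
-- outside 0..18 ∪ {255} (Python A raises ValueError).
def Pre_remap_label (label : Int) (classes : Int) : Prop :=
  (classes = 18 ∨ classes = 2) ∧ (label = 255 ∨ (0 ≤ label ∧ label ≤ 18))
instance (label : Int) (classes : Int) : Decidable (Pre_remap_label label classes) := by
  unfold Pre_remap_label; infer_instance

def pvWitness_remap_label : Int × Int := (5, 18)

def Spec_remap_label (label : Int) (classes : Int) (out : Int × String) : Prop := out = remap_label_alt label classes
instance (label : Int) (classes : Int) (out : Int × String) : Decidable (Spec_remap_label label classes out) := by unfold Spec_remap_label; infer_instance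

-- ===== CLAIM (what is proved, stated in full; the proofs are below) =====
def Claim_equal_remap_label : Prop := ∀ (label : Int) (classes : Int), Dom_remap_label label classes → Pre_remap_label label classes → Spec_remap_label label classes (remap_label label classes)

-- ===== LEMMAS AND PROOFS =====

-- ===== VERDICT (by name: the statement is the Claim_ definition above) =====
theorem remap_label_spec : Claim_equal_remap_label := by
  intro label classes _ hpre
  obtain ⟨hc, hl⟩ := hpre
  have hl' : label = 255 ∨ label = 0 ∨ label = 1 ∨ label = 2 ∨ label = 3 ∨ label = 4 ∨
      label = 5 ∨ label = 6 ∨ label = 7 ∨ label = 8 ∨ label = 9 ∨ label = 10 ∨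
      label = 11 ∨ label = 12 ∨ label = 13 ∨ label = 14 ∨ label = 15 ∨ label = 16 ∨
      label = 17 ∨ label = 18 := by omega
  rcases hc with h | h <;> subst h <;>
    rcases hl' with h | h | h | h | h | h | h | h | h | h | h | h | h | h | h | h | h | h | h | h <;>
    subst h <;> decide
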